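-- pv_equiv track=rewrite | github.com/Gu-wop/T-414-AFLV | set_03/kaffi/test.py | solve_chair_stacking
-- ===== SOURCE A (Python) =====
-- def solve_chair_stacking(w, chair_counts):
--     """
--     PROBLEM ANALYSIS:
--     - We have chairs of different colors that must be grouped by color
--     - Room width = w meters, so we can have at most w stacks
--     - Each stack occupies 1 meter width
--     - Goal: minimize disorganization = w * max_height - total_chairs
--
--     KEY INSIGHT:
--     To minimize disorganization, we need to minimize max_height.
--     But we're constrained by the room width (max w stacks).
--
--     STRATEGY:
--     Binary search for the minimum max_height that allows
--     fitting all chairs within w stacks.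
--     """
--     total_chairs = sum(chair_counts)
--
--     # Binary search bounds:
--     # - Minimum possible height: 1 (at least 1 chair per stack)
--     # - Maximum possible height: max(chair_counts) (worst case: all chairs of one color in one stack)
--     left, right = 1, max(chair_counts)
--
--     def can_fit_with_max_height(max_height):
--         """
--         Check if we can fit all chairs using at most w stacks
--         with given maximum stack height.
--
--         For each color with 'count' chairs:
--         - We need ceil(count / max_height) stacks
--         - This is calculated as: (count + max_height - 1) // max_height
--         """
--         stacks_needed = 0
--
--         for count in chair_counts:
--             # Calculate stacks needed for this color
--             # Using ceiling division: ceil(a/b) = (a + b - 1) // b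
--             stacks_for_this_color = (count + max_height - 1) // max_height
--             stacks_needed += stacks_for_this_color
--
--             # Early termination: if we already exceed w stacks, no point continuing
--             if stacks_needed > w:
--                 return False
--
--         return stacks_needed <= w
--
--     # Binary search for minimum feasible max_height
--     while left < right:
--         mid = (left + right) // 2
--         if can_fit_with_max_height(mid):
--             # mid works, try to find smaller value
--             right = mid
--         else:
--             # mid doesn't work, need larger value
--             left = mid + 1
--
--     max_height = left
--
--     # Calculate final disorganization
--     # Wall area = w * max_height
--     # Chair area = total_chairs
--     # Disorganization = wall_area - chair_area
--     disorganization = w * max_height - total_chairs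
--
--     return disorganization
-- ===== SOURCE B (Python) =====
-- def solve_chair_stacking(w, chair_counts):
--     """
--     Minimize disorganization w * height - total over stack heights in
--     [1, max(chair_counts)], where a height h is usable iff the chairs fit
--     in at most w stacks, i.e. sum(ceil(c / h)) <= w.
--
--     Instead of binary search, sweep heights upward.  Start at the
--     pigeonhole lower bound ceil(total / w) (w stacks of height h hold at
--     most w * h chairs), and since sum(ceil(c / h)) is piecewise constant
--     in h, jump from an unusable height straight to the next height at
--     which some color needs fewer stacks, skipping the whole plateau.
--     """
--     total = sum(chair_counts)
--     top = max(chair_counts)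
--
--     def fits(h):
--         need = 0
--         for c in chair_counts:
--             need += -(-c // h)
--             if need > w:
--                 return False
--         return True
--
--     h = 1
--     if w > 0 and total > 0:
--         h = min(-(-total // w), top)
--     if h < top and not fits(top):
--         h = top  # even the tallest height in range is unusable
--     while h < top and not fits(h):
--         nxt = top
--         for c in chair_counts:
--             v = -(-c // h)
--             if v >= 2:
--                 nxt = min(nxt, -(-c // (v - 1)))
--         h = max(nxt, h + 1)
--     return w * h - total
-- ===== Notes on version B (the rewrite author's own statement) =====
-- stated objective: alternative
-- what changed: Replaces A's binary search over heights by an upward sweep that starts at the pigeonhole lower bound ceil(total/w), prechecks the top of the range, and jumps from one plateau of the piecewise-constant stack-count function straight to its next breakpoint; Pre_ excludes the empty list (A raises ValueError) and mixed-sign chair counts where w makes feasibility height-dependent, since negative counts make A's early-exit test non-monotone and either search's settling height is accidental there.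
-- outside the precondition, e.g. on solve_chair_stacking(3, [10, 0, -4, -15, 1, 15]): A returns 23, B returns 8; on solve_chair_stacking(1, [4, -15, 13]): A returns 5, B returns 3
import Mathlib
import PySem

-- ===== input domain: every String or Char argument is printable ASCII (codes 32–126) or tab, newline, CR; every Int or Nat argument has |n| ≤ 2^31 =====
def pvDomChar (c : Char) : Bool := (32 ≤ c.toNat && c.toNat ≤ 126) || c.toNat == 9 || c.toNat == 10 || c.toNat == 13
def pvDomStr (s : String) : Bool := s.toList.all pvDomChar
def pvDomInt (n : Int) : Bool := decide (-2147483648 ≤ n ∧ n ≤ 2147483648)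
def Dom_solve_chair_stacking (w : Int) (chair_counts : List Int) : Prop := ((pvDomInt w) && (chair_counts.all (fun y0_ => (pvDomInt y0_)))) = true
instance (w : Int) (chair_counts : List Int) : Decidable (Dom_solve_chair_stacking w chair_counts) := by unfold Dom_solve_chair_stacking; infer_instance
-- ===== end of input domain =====

-- B replaces A's bisection by an upward plateau-jumping sweep that starts at the pigeonhole bound ceil(total/w) (objective: alternative; equal values proved on Pre_).

-- ===== PORT A =====
-- A's inner `can_fit_with_max_height`: running total with early exit, final check `stacks_needed <= w`.
def pvCanFitA (w mh : Int) (s : Int) : List Int → Bool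
  | [] => decide (s ≤ w)
  | c :: rest =>
    let s' := s + PySem.Int.floordiv (c + mh - 1) mh
    if w < s' then false else pvCanFitA w mh s' rest

-- A's `while left < right` binary search.
def pvBisectA (w : Int) (cc : List Int) (l r : Int) : Int :=
  if h : l < r then
    let mid := PySem.Int.floordiv (l + r) 2
    if pvCanFitA w mid 0 cc then pvBisectA w cc l mid else pvBisectA w cc (mid + 1) r
  else l
termination_by (r - l).toNat
decreasing_by
  all_goals
    have h1 := PySem.Int.floordiv_two_mid_bounds (le_of_lt h)
    have h2 : PySem.Int.floordiv (l + r) 2 < r := by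
      rw [PySem.Int.floordiv_lt_iff_lt_mul (by norm_num)]
      omega
    omega

def solve_chair_stacking (w : Int) (chair_counts : List Int) : Int :=
  match PySem.List.max? chair_counts (fun x => x) with
  | none => 0  -- max([]) raises ValueError in Python; excluded by Pre_
  | some right =>
    let total := chair_counts.sum
    let max_height := pvBisectA w chair_counts 1 right
    w * max_height - total

-- ===== PORT B =====
-- Source B's inner `fits`: running total of -(-c // h) with early exit, `return True` after the loop.
def pvFitsB (w h : Int) (need : Int) : List Int → Bool
  | [] => true
  | c :: rest =>
    let need' := need + -(PySem.Int.floordiv (-c) h)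
    if w < need' then false else pvFitsB w h need' rest

-- Source B's inner `for c in chair_counts: ...` computing nxt.
def pvNextB (h : Int) (cc : List Int) (nxt0 : Int) : Int :=
  cc.foldl (fun nxt c =>
    let v := -(PySem.Int.floordiv (-c) h)
    if 2 ≤ v then
      let step := -(PySem.Int.floordiv (-c) (v - 1))
      if step < nxt then step else nxt
    else nxt) nxt0

-- Source B's `while h < top` plateau-jumping sweep.
def pvLoopB (w : Int) (cc : List Int) (h top : Int) : Int :=
  if hlt : h < top then
    if pvFitsB w h 0 cc then h
    else pvLoopB w cc (max (pvNextB h cc top) (h + 1)) top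
  else h
termination_by (top - h).toNat
decreasing_by
  omega

def solve_chair_stacking_alt (w : Int) (chair_counts : List Int) : Int :=
  match PySem.List.max? chair_counts (fun x => x) with
  | none => 0  -- max([]) raises ValueError in Python; excluded by Pre_
  | some top =>
    let total := chair_counts.sum
    let h0 : Int :=
      if 0 < w ∧ 0 < total then min (-(PySem.Int.floordiv (-total) w)) top else 1
    let h1 : Int :=
      if h0 < top ∧ pvFitsB w top 0 chair_counts = false then top else h0
    let res := pvLoopB w chair_counts h1 top
    w * res - total

-- ===== PRECONDITION & SPEC =====
-- helpers of the precondition (input arithmetic only; they reach neither port)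
def pvFloorNeed (cc : List Int) : Int := (cc.map (fun c => if 0 < c then (1 : Int) else c)).sum
def pvSumPos (cc : List Int) : Int := (cc.map (fun c => max c 0)).sum

-- Pre_ excludes the empty list (A raises ValueError) and inputs whose chair counts mix positive
-- and negative numbers while w makes feasibility genuinely height-dependent: negative counts are
-- outside the task's meaning and make A's early-exit feasibility test non-monotone in the height,
-- so the bisection and any other exact search may legitimately settle on different heights there.
def Pre_solve_chair_stacking (w : Int) (chair_counts : List Int) : Prop :=
  chair_counts ≠ [] ∧
    ((∀ c ∈ chair_counts, 0 ≤ c) ∨ (∀ c ∈ chair_counts, c ≤ 0) ∨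
      w < pvFloorNeed chair_counts ∨ pvSumPos chair_counts ≤ w)
instance (w : Int) (chair_counts : List Int) : Decidable (Pre_solve_chair_stacking w chair_counts) := by
  unfold Pre_solve_chair_stacking; infer_instance

def pvWitness_solve_chair_stacking : Int × List Int := (3, [5, 2, 2])

def Spec_solve_chair_stacking (w : Int) (chair_counts : List Int) (out : Int) : Prop := out = solve_chair_stacking_alt w chair_counts
instance (w : Int) (chair_counts : List Int) (out : Int) : Decidable (Spec_solve_chair_stacking w chair_counts out) := by unfold Spec_solve_chair_stacking; infer_instance

-- ===== CLAIM (what is proved, stated in full; the proofs are below) =====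
def Claim_equal_solve_chair_stacking : Prop := ∀ (w : Int) (chair_counts : List Int), Dom_solve_chair_stacking w chair_counts → Pre_solve_chair_stacking w chair_counts → Spec_solve_chair_stacking w chair_counts (solve_chair_stacking w chair_counts)

-- ===== LEMMAS AND PROOFS =====

-- ---- ceiling division: pvCeil c h = ⌈c/h⌉, exactly A's (c + h - 1) // h ----
def pvCeil (c h : Int) : Int := PySem.Int.floordiv (c + h - 1) h
def pvS (cc : List Int) (h : Int) : Int := (cc.map (fun c => pvCeil c h)).sum

theorem pvCeil_le_iff (c k h : Int) (hp : 0 < h) : pvCeil c h ≤ k ↔ c ≤ k * h := by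
  unfold pvCeil
  constructor
  · intro hk
    have h2 : c + h - 1 < (k + 1) * h := by
      rw [← PySem.Int.floordiv_lt_iff_lt_mul hp]; omega
    have h3 : (k + 1) * h = k * h + h := by ring
    omega
  · intro hk
    have h3 : (k + 1) * h = k * h + h := by ring
    have h2 : c + h - 1 < (k + 1) * h := by omega
    have := (PySem.Int.floordiv_lt_iff_lt_mul hp).mpr h2
    omega

theorem pvCeil_mul_ge (c h : Int) (hp : 0 < h) : c ≤ pvCeil c h * h :=
  (pvCeil_le_iff c (pvCeil c h) h hp).mp le_rfl

theorem pvCeil_nonneg (c h : Int) (hp : 0 < h) (hc : 0 ≤ c) : 0 ≤ pvCeil c h := by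
  by_contra hcon
  have h1 : c ≤ (-1) * h := (pvCeil_le_iff c (-1) h hp).mp (by omega)
  nlinarith

theorem pvCeil_pos (c h : Int) (hp : 0 < h) (hc : 1 ≤ c) : 1 ≤ pvCeil c h := by
  by_contra hcon
  exact absurd ((pvCeil_le_iff c 0 h hp).mp (by omega)) (by nlinarith)

theorem pvCeil_antitone (c h g : Int) (hp : 0 < h) (hg : h ≤ g) (hc : 0 ≤ c) :
    pvCeil c g ≤ pvCeil c h := by
  have h0 : 0 ≤ pvCeil c h := pvCeil_nonneg c h hp hc
  refine (pvCeil_le_iff c (pvCeil c h) g (by omega)).mpr ?_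
  have h1 := pvCeil_mul_ge c h hp
  nlinarith

theorem pvCeil_le_self (c h : Int) (hp : 0 < h) (hc : 0 ≤ c) : pvCeil c h ≤ c := by
  refine (pvCeil_le_iff c c h hp).mpr (by nlinarith)

theorem pvCeil_nonpos (c h : Int) (hp : 0 < h) (hc : c ≤ 0) : pvCeil c h ≤ 0 := by
  refine (pvCeil_le_iff c 0 h hp).mpr (by omega)

theorem pvCeil_ge_self_nonpos (c h : Int) (hp : 0 < h) (hc : c ≤ 0) : c ≤ pvCeil c h := by
  by_contra hcon
  exact absurd ((pvCeil_le_iff c (c - 1) h hp).mp (by omega)) (by nlinarith)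

theorem pvCeil_le_max (c h : Int) (hp : 0 < h) : pvCeil c h ≤ max c 0 := by
  by_cases hc : 0 ≤ c
  · exact le_trans (pvCeil_le_self c h hp hc) (le_max_left c 0)
  · exact le_trans (pvCeil_nonpos c h hp (by omega)) (le_max_right c 0)

theorem pvCeil_eq_one (c h : Int) (hp : 0 < h) (h1 : 1 ≤ c) (h2 : c ≤ h) : pvCeil c h = 1 := by
  have := pvCeil_pos c h hp h1
  have := (pvCeil_le_iff c 1 h hp).mpr (by omega)
  omega

theorem pvCeil_zero (h : Int) (hp : 0 < h) : pvCeil 0 h = 0 := by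
  have := pvCeil_nonpos 0 h hp le_rfl
  have := pvCeil_nonneg 0 h hp le_rfl
  omega

theorem pvCeilB_eq (c h : Int) (hp : 0 < h) : -(PySem.Int.floordiv (-c) h) = pvCeil c h := by
  rw [PySem.Int.neg_floordiv_neg_eq_iff_of_pos hp]
  constructor
  · by_contra hcon
    push Not at hcon
    have h1 : c ≤ (pvCeil c h - 1) * h := by nlinarith
    have := (pvCeil_le_iff c (pvCeil c h - 1) h hp).mpr h1
    omega
  · exact pvCeil_mul_ge c h hp

theorem pvCeil_ge_two_pos (c h : Int) (hp : 0 < h) (hv : 2 ≤ pvCeil c h) : 1 ≤ c := by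
  by_contra hcon
  exact absurd ((pvCeil_le_iff c 0 h hp).mpr (by nlinarith)) (by omega)

theorem pvCeil_plateau (c h g : Int) (hp : 0 < h) (hv : 2 ≤ pvCeil c h) (hg : h ≤ g)
    (hlt : g < pvCeil c (pvCeil c h - 1)) : pvCeil c g = pvCeil c h := by
  have hc : 1 ≤ c := pvCeil_ge_two_pos c h hp hv
  have hup : pvCeil c g ≤ pvCeil c h := pvCeil_antitone c h g hp hg (by omega)
  by_contra hcon
  have hle : pvCeil c g ≤ pvCeil c h - 1 := by omega
  have h1 : c ≤ (pvCeil c h - 1) * g := by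
    have := (pvCeil_le_iff c (pvCeil c g) g (by omega)).mp le_rfl
    have h2 : 0 ≤ g := by omega
    nlinarith
  have : pvCeil c (pvCeil c h - 1) ≤ g := (pvCeil_le_iff c g (pvCeil c h - 1) (by omega)).mpr
    (by linarith [mul_comm (pvCeil c h - 1) g])
  omega

theorem pvCeil_stable_small (c h g : Int) (hp : 0 < h) (hg : h ≤ g) (hc : 0 ≤ c)
    (hv : pvCeil c h ≤ 1) : pvCeil c g = pvCeil c h := by
  by_cases hc1 : 1 ≤ c
  · have h1 : pvCeil c h = 1 := by have := pvCeil_pos c h hp hc1; omega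
    have h2 : c ≤ h := by
      have := (pvCeil_le_iff c 1 h hp).mp (by omega); omega
    rw [h1, pvCeil_eq_one c g (by omega) hc1 (by omega)]
  · have h0 : c = 0 := by omega
    rw [h0, pvCeil_zero h hp, pvCeil_zero g (by omega)]

-- ---- aggregate stack count pvS and its bounds ----
theorem pvS_nil (h : Int) : pvS [] h = 0 := rfl
theorem pvS_cons (c : Int) (cc : List Int) (h : Int) : pvS (c :: cc) h = pvCeil c h + pvS cc h := by
  simp [pvS]

theorem pvS_nonneg (cc : List Int) (h : Int) (hp : 0 < h) (hnn : ∀ c ∈ cc, 0 ≤ c) : 0 ≤ pvS cc h := by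
  induction cc with
  | nil => simp [pvS_nil]
  | cons c rest ih =>
    rw [pvS_cons]
    have h1 := pvCeil_nonneg c h hp (hnn c (by simp))
    have h2 := ih (fun x hx => hnn x (by simp [hx]))
    omega

theorem pvS_antitone (cc : List Int) (h g : Int) (hp : 0 < h) (hg : h ≤ g)
    (hnn : ∀ c ∈ cc, 0 ≤ c) : pvS cc g ≤ pvS cc h := by
  induction cc with
  | nil => simp [pvS_nil]
  | cons c rest ih =>
    rw [pvS_cons, pvS_cons]
    have h1 := pvCeil_antitone c h g hp hg (hnn c (by simp))
    have h2 := ih (fun x hx => hnn x (by simp [hx]))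
    omega

theorem pvSumPos_cons (c : Int) (cc : List Int) : pvSumPos (c :: cc) = max c 0 + pvSumPos cc := by
  simp [pvSumPos]

theorem pvSumPos_nonneg (cc : List Int) : 0 ≤ pvSumPos cc := by
  induction cc with
  | nil => simp [pvSumPos]
  | cons c rest ih =>
    rw [pvSumPos_cons]
    have : (0 : Int) ≤ max c 0 := le_max_right c 0
    omega

theorem pvSum_le_mul_S (cc : List Int) (h : Int) (hp : 0 < h) : cc.sum ≤ h * pvS cc h := by
  induction cc with
  | nil => simp [pvS_nil]
  | cons c rest ih =>
    rw [pvS_cons, List.sum_cons]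
    have h1 : c ≤ pvCeil c h * h := pvCeil_mul_ge c h hp
    have h2 : h * (pvCeil c h + pvS rest h) = pvCeil c h * h + h * pvS rest h := by ring
    omega

theorem pvS_congr (cc : List Int) (h g : Int) (hpt : ∀ c ∈ cc, pvCeil c g = pvCeil c h) :
    pvS cc g = pvS cc h := by
  unfold pvS
  rw [List.map_congr_left (fun c hc => hpt c hc)]

-- ---- A's early-exit feasibility test vs the aggregate sum ----
theorem pvCanFitA_eq (w mh : Int) (cc : List Int) (hp : 0 < mh) (hnn : ∀ c ∈ cc, 0 ≤ c) :
    ∀ s : Int, pvCanFitA w mh s cc = decide (s + pvS cc mh ≤ w) := by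
  induction cc with
  | nil => intro s; simp [pvCanFitA, pvS_nil]
  | cons c rest ih =>
    intro s
    rw [pvCanFitA, pvS_cons]
    by_cases hover : w < s + PySem.Int.floordiv (c + mh - 1) mh
    · have hrest : 0 ≤ pvS rest mh := pvS_nonneg rest mh hp (fun x hx => hnn x (by simp [hx]))
      have : pvCeil c mh = PySem.Int.floordiv (c + mh - 1) mh := rfl
      simp only [hover, if_pos]
      symm
      simp only [decide_eq_false_iff_not]
      omega
    · simp only [hover, if_false]
      rw [ih (fun x hx => hnn x (by simp [hx]))]
      have hc : pvCeil c mh = PySem.Int.floordiv (c + mh - 1) mh := rfl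
      rw [decide_eq_decide]
      omega

-- ---- B's early-exit feasibility test vs the aggregate sum (nonempty list) ----
theorem pvFitsB_eq (w h : Int) (hp : 0 < h) :
    ∀ (cc : List Int), cc ≠ [] → (∀ c ∈ cc, 0 ≤ c) →
      ∀ s : Int, pvFitsB w h s cc = decide (s + pvS cc h ≤ w) := by
  intro cc
  induction cc with
  | nil => intro hne; exact absurd rfl hne
  | cons c rest ih =>
    intro _ hnn s
    rw [pvFitsB, pvS_cons]
    rw [pvCeilB_eq c h hp]
    by_cases hover : w < s + pvCeil c h
    · have hrest : 0 ≤ pvS rest h := pvS_nonneg rest h hp (fun x hx => hnn x (by simp [hx]))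
      simp only [hover, if_pos]
      symm
      simp only [decide_eq_false_iff_not]
      omega
    · simp only [hover, if_false]
      cases rest with
      | nil =>
        have hz : pvS ([] : List Int) h = 0 := rfl
        simp only [pvFitsB]
        symm
        simp only [decide_eq_true_eq]
        omega
      | cons d rest' =>
        rw [ih (by simp) (fun x hx => hnn x (by simp [hx])) (s + pvCeil c h)]
        rw [decide_eq_decide]
        omega

-- ---- the two tests are constant when w is below/above the universal bounds ----
theorem pvCanFitA_false_of_floor (w mh : Int) (cc : List Int) (hp : 0 < mh) :
    ∀ s : Int, w < s + pvFloorNeed cc → pvCanFitA w mh s cc = false := by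
  induction cc with
  | nil => intro s hw; simp [pvFloorNeed] at hw; simp [pvCanFitA]; omega
  | cons c rest ih =>
    intro s hw
    rw [pvCanFitA]
    by_cases hover : w < s + PySem.Int.floordiv (c + mh - 1) mh
    · simp [hover]
    · simp only [hover, if_false]
      apply ih
      have hstep : (if 0 < c then (1 : Int) else c) ≤ pvCeil c mh := by
        by_cases hc : 0 < c
        · simpa [hc] using pvCeil_pos c mh hp (by omega)
        · simpa [hc] using pvCeil_ge_self_nonpos c mh hp (by omega)
      have hfn : pvFloorNeed (c :: rest) = (if 0 < c then (1 : Int) else c) + pvFloorNeed rest := by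
        simp [pvFloorNeed]
      have : pvCeil c mh = PySem.Int.floordiv (c + mh - 1) mh := rfl
      omega

theorem pvFitsB_false_of_floor (w h : Int) (hp : 0 < h) :
    ∀ (rest : List Int) (c : Int) (s : Int), w < s + pvFloorNeed (c :: rest) →
      pvFitsB w h s (c :: rest) = false := by
  intro rest
  induction rest with
  | nil =>
    intro c s hw
    rw [pvFitsB, pvCeilB_eq c h hp]
    have hstep : (if 0 < c then (1 : Int) else c) ≤ pvCeil c h := by
      by_cases hc : 0 < c
      · simpa [hc] using pvCeil_pos c h hp (by omega)
      · simpa [hc] using pvCeil_ge_self_nonpos c h hp (by omega)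
    have hfn : pvFloorNeed [c] = (if 0 < c then (1 : Int) else c) := by
      simp [pvFloorNeed]
    have hover : w < s + pvCeil c h := by omega
    simp [hover]
  | cons d rest' ih =>
    intro c s hw
    rw [pvFitsB, pvCeilB_eq c h hp]
    by_cases hover : w < s + pvCeil c h
    · simp [hover]
    · simp only [hover, if_false]
      apply ih
      have hstep : (if 0 < c then (1 : Int) else c) ≤ pvCeil c h := by
        by_cases hc : 0 < c
        · simpa [hc] using pvCeil_pos c h hp (by omega)
        · simpa [hc] using pvCeil_ge_self_nonpos c h hp (by omega)
      have hfn : pvFloorNeed (c :: d :: rest') =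
          (if 0 < c then (1 : Int) else c) + pvFloorNeed (d :: rest') := by
        simp [pvFloorNeed]
      omega

theorem pvCanFitA_true_of_sumPos (w mh : Int) (cc : List Int) (hp : 0 < mh) :
    ∀ s : Int, s + pvSumPos cc ≤ w → pvCanFitA w mh s cc = true := by
  induction cc with
  | nil => intro s hw; simp [pvSumPos] at hw; simp [pvCanFitA]; omega
  | cons c rest ih =>
    intro s hw
    rw [pvCanFitA]
    have hstep : pvCeil c mh ≤ max c 0 := pvCeil_le_max c mh hp
    have hsp := pvSumPos_nonneg rest
    have hfn := pvSumPos_cons c rest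
    have hceq : pvCeil c mh = PySem.Int.floordiv (c + mh - 1) mh := rfl
    have hover : ¬ w < s + PySem.Int.floordiv (c + mh - 1) mh := by omega
    simp only [hover, if_false]
    exact ih (s + PySem.Int.floordiv (c + mh - 1) mh) (by omega)

theorem pvFitsB_true_of_sumPos (w h : Int) (cc : List Int) (hp : 0 < h) :
    ∀ s : Int, s + pvSumPos cc ≤ w → pvFitsB w h s cc = true := by
  induction cc with
  | nil => intro s hw; simp [pvFitsB]
  | cons c rest ih =>
    intro s hw
    rw [pvFitsB]
    rw [pvCeilB_eq c h hp]
    have hstep : pvCeil c h ≤ max c 0 := pvCeil_le_max c h hp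
    have hsp := pvSumPos_nonneg rest
    have hfn := pvSumPos_cons c rest
    have hover : ¬ w < s + pvCeil c h := by omega
    simp only [hover, if_false]
    exact ih (s + pvCeil c h) (by omega)

-- ---- the common characterisation of both searches' results ----
def pvGood (w : Int) (cc : List Int) (right x : Int) : Prop :=
  1 ≤ x ∧ x ≤ max 1 right ∧ (∀ g, 1 ≤ g → g < x → ¬ (pvS cc g ≤ w)) ∧ (x < right → pvS cc x ≤ w)

theorem pvGood_unique (w : Int) (cc : List Int) (right x y : Int)
    (hx : pvGood w cc right x) (hy : pvGood w cc right y) : x = y := by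
  obtain ⟨hx1, hx2, hx3, hx4⟩ := hx
  obtain ⟨hy1, hy2, hy3, hy4⟩ := hy
  rcases lt_trichotomy x y with hlt | heq | hlt
  · exfalso
    have hnx : ¬ (pvS cc x ≤ w) := hy3 x hx1 hlt
    have hxr : ¬ x < right := fun hh => hnx (hx4 hh)
    omega
  · exact heq
  · exfalso
    have hny : ¬ (pvS cc y ≤ w) := hx3 y hy1 hlt
    have hyr : ¬ y < right := fun hh => hny (hy4 hh)
    omega

-- ---- A's bisection satisfies the characterisation (monotone regime: 0 ≤ every count) ----
theorem pvBisect_good (w right : Int) (cc : List Int) (hnn : ∀ c ∈ cc, 0 ≤ c)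
    (l r : Int) (hl : 1 ≤ l) (hlr : l ≤ r) (hrr : r ≤ right)
    (hleft : ∀ g, 1 ≤ g → g < l → ¬ (pvS cc g ≤ w)) (hright : r < right → pvS cc r ≤ w) :
    pvGood w cc right (pvBisectA w cc l r) := by
  by_cases hlt : l < r
  · rw [pvBisectA]
    rw [dif_pos hlt]
    have hmid := PySem.Int.floordiv_two_mid_bounds (le_of_lt hlt)
    have hmidr : PySem.Int.floordiv (l + r) 2 < r := by
      rw [PySem.Int.floordiv_lt_iff_lt_mul (by norm_num)]
      omega
    set mid := PySem.Int.floordiv (l + r) 2 with hmiddef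
    dsimp only
    have hprobe : pvCanFitA w mid 0 cc = decide (0 + pvS cc mid ≤ w) :=
      pvCanFitA_eq w mid cc (by omega) hnn 0
    by_cases hq : pvS cc mid ≤ w
    · have : pvCanFitA w mid 0 cc = true := by rw [hprobe]; simp; omega
      rw [this]
      simp only [if_true]
      exact pvBisect_good w right cc hnn l mid hl (by omega) (by omega) hleft
        (fun _ => hq)
    · have : pvCanFitA w mid 0 cc = false := by rw [hprobe]; simp; omega
      rw [this]
      simp only [Bool.false_eq_true, if_false]
      refine pvBisect_good w right cc hnn (mid + 1) r (by omega) (by omega) hrr ?_ hright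
      intro g hg1 hgm hqs
      have hSmid : pvS cc mid ≤ pvS cc g := pvS_antitone cc g mid (by omega) (by omega) hnn
      exact hq (by omega)
  · have hleq : l = r := by omega
    rw [pvBisectA]
    rw [dif_neg hlt]
    refine ⟨hl, by omega, hleft, by rw [hleq]; exact hright⟩
termination_by (r - l).toNat
decreasing_by
  · omega
  · omega

-- unfolding helper: bisection is skipped when the range is empty
theorem pvBisect_skip (w : Int) (cc : List Int) (l r : Int) (h : ¬ l < r) :
    pvBisectA w cc l r = l := by
  rw [pvBisectA]
  rw [dif_neg h]

-- ---- bisection under a constant predicate ----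
theorem pvBisect_allfalse (w : Int) (cc : List Int)
    (hall : ∀ mh : Int, 0 < mh → pvCanFitA w mh 0 cc = false) :
    ∀ l r : Int, 1 ≤ l → pvBisectA w cc l r = max l r := by
  intro l r hl
  by_cases hlt : l < r
  · rw [pvBisectA]
    rw [dif_pos hlt]
    have hmid := PySem.Int.floordiv_two_mid_bounds (le_of_lt hlt)
    dsimp only
    rw [hall _ (by omega)]
    simp only [Bool.false_eq_true, if_false]
    rw [pvBisect_allfalse w cc hall (PySem.Int.floordiv (l + r) 2 + 1) r (by omega)]
    have hmidr : PySem.Int.floordiv (l + r) 2 < r := by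
      rw [PySem.Int.floordiv_lt_iff_lt_mul (by norm_num)]
      omega
    omega
  · rw [pvBisect_skip w cc l r hlt]
    omega
termination_by l r => (r - l).toNat
decreasing_by omega

theorem pvBisect_alltrue (w : Int) (cc : List Int)
    (hall : ∀ mh : Int, 0 < mh → pvCanFitA w mh 0 cc = true) :
    ∀ l r : Int, 1 ≤ l → pvBisectA w cc l r = l := by
  intro l r hl
  by_cases hlt : l < r
  · rw [pvBisectA]
    rw [dif_pos hlt]
    have hmid := PySem.Int.floordiv_two_mid_bounds (le_of_lt hlt)
    dsimp only
    rw [hall _ (by omega)]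
    simp only [if_true]
    exact pvBisect_alltrue w cc hall l (PySem.Int.floordiv (l + r) 2) hl
  · exact pvBisect_skip w cc l r hlt
termination_by l r => (r - l).toNat
decreasing_by
  have hmidr : PySem.Int.floordiv (l + r) 2 < r := by
    rw [PySem.Int.floordiv_lt_iff_lt_mul (by norm_num)]
    omega
  omega

-- ---- the jump bound computed by B's inner for-loop ----
theorem pvNextB_le_init (h : Int) (cc : List Int) : ∀ n0 : Int, pvNextB h cc n0 ≤ n0 := by
  induction cc with
  | nil => intro n0; simp [pvNextB]
  | cons c rest ih =>
    intro n0
    have hstep : pvNextB h (c :: rest) n0 = pvNextB h rest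
        (let v := -(PySem.Int.floordiv (-c) h)
         if 2 ≤ v then
           let step := -(PySem.Int.floordiv (-c) (v - 1))
           if step < n0 then step else n0
         else n0) := rfl
    rw [hstep]
    refine le_trans (ih _) ?_
    dsimp only
    split
    · split <;> omega
    · omega

theorem pvNextB_le_step (h : Int) (hp : 0 < h) (cc : List Int) (c : Int) (hc : c ∈ cc)
    (hv : 2 ≤ pvCeil c h) : ∀ n0 : Int, pvNextB h cc n0 ≤ pvCeil c (pvCeil c h - 1) := by
  induction cc with
  | nil => cases hc
  | cons d rest ih =>
    intro n0
    have hstep : pvNextB h (d :: rest) n0 = pvNextB h rest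
        (let v := -(PySem.Int.floordiv (-d) h)
         if 2 ≤ v then
           let step := -(PySem.Int.floordiv (-d) (v - 1))
           if step < n0 then step else n0
         else n0) := rfl
    rcases List.mem_cons.mp hc with hdc | hmem
    · subst hdc
      rw [hstep]
      refine le_trans (pvNextB_le_init h rest _) ?_
      dsimp only
      rw [pvCeilB_eq c h hp] at *
      have hv2 : (2 : Int) ≤ pvCeil c h := hv
      rw [if_pos hv2]
      rw [pvCeilB_eq c (pvCeil c h - 1) (by omega)]
      split <;> omega
    · rw [hstep]
      exact ih hmem _

-- ---- B's plateau-jumping sweep satisfies the characterisation ----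
theorem pvLoop_good (w right : Int) (cc : List Int) (hnn : ∀ c ∈ cc, 0 ≤ c) (hne : cc ≠ []) :
    ∀ h : Int, 1 ≤ h → h ≤ max 1 right → (∀ g, 1 ≤ g → g < h → ¬ (pvS cc g ≤ w)) →
      pvGood w cc right (pvLoopB w cc h right) := by
  intro h hh hhm hleft
  by_cases hlt : h < right
  · rw [pvLoopB]
    rw [dif_pos hlt]
    have hprobe : pvFitsB w h 0 cc = decide (0 + pvS cc h ≤ w) :=
      pvFitsB_eq w h (by omega) cc hne hnn 0
    by_cases hq : pvS cc h ≤ w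
    · have hfit : pvFitsB w h 0 cc = true := by rw [hprobe]; simp; omega
      rw [hfit]
      simp only [if_true]
      exact ⟨hh, by omega, hleft, fun _ => hq⟩
    · have hfit : pvFitsB w h 0 cc = false := by rw [hprobe]; simp; omega
      rw [hfit]
      simp only [Bool.false_eq_true, if_false]
      set nxt := pvNextB h cc right with hnxtdef
      have hnle : nxt ≤ right := pvNextB_le_init h cc right
      have hleft' : ∀ g, 1 ≤ g → g < max nxt (h + 1) → ¬ (pvS cc g ≤ w) := by
        intro g hg1 hglt
        by_cases hgh : g < h
        · exact hleft g hg1 hgh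
        · -- h ≤ g: the aggregate is unchanged on [h, g]
          have hgeq : pvS cc g = pvS cc h := by
            by_cases hjump : h < nxt
            · have hmx : max nxt (h + 1) = nxt := by omega
              rw [hmx] at hglt
              refine pvS_congr cc h g ?_
              intro c hcm
              by_cases hv : 2 ≤ pvCeil c h
              · exact pvCeil_plateau c h g (by omega) hv (by omega)
                  (by have := pvNextB_le_step h (by omega) cc c hcm hv right; omega)
              · exact pvCeil_stable_small c h g (by omega) (by omega) (hnn c hcm) (by omega)
            · have hmx : max nxt (h + 1) = h + 1 := by omega
              rw [hmx] at hglt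
              have : g = h := by omega
              rw [this]
          rw [hgeq]
          exact hq
      exact pvLoop_good w right cc hnn hne (max nxt (h + 1))
        (by omega) (by omega) hleft'
  · rw [pvLoopB]
    rw [dif_neg hlt]
    exact ⟨hh, hhm, hleft, fun hc => absurd hc hlt⟩
termination_by h => (right - h).toNat
decreasing_by
  omega

-- unfolding helper: the sweep is skipped when the range is empty
theorem pvLoop_skip (w : Int) (cc : List Int) (h top : Int) (hlt : ¬ h < top) :
    pvLoopB w cc h top = h := by
  rw [pvLoopB]
  rw [dif_neg hlt]

-- ---- the sweep under an everywhere-false predicate walks to the top ----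
theorem pvLoop_allfalse (w : Int) (cc : List Int)
    (hall : ∀ g : Int, 0 < g → pvFitsB w g 0 cc = false) :
    ∀ h top : Int, 0 < h → h ≤ top → pvLoopB w cc h top = top := by
  intro h top hh hht
  by_cases hlt : h < top
  · rw [pvLoopB]
    rw [dif_pos hlt]
    rw [hall h hh]
    simp only [Bool.false_eq_true, if_false]
    have hnle : pvNextB h cc top ≤ top := pvNextB_le_init h cc top
    exact pvLoop_allfalse w cc hall (max (pvNextB h cc top) (h + 1)) top (by omega) (by omega)
  · rw [pvLoop_skip w cc h top hlt]
    omega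
termination_by h top => (top - h).toNat
decreasing_by
  have hnle : pvNextB h cc top ≤ top := pvNextB_le_init h cc top
  omega

theorem pvSum_nonpos (cc : List Int) (hle : ∀ c ∈ cc, c ≤ 0) : cc.sum ≤ 0 := by
  induction cc with
  | nil => simp
  | cons c rest ih =>
    rw [List.sum_cons]
    have h1 := hle c (by simp)
    have h2 := ih (fun x hx => hle x (by simp [hx]))
    omega

theorem pvSum_le_sumPos (cc : List Int) : cc.sum ≤ pvSumPos cc := by
  induction cc with
  | nil => simp [pvSumPos]
  | cons c rest ih =>
    rw [List.sum_cons, pvSumPos_cons]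
    have : c ≤ max c 0 := le_max_left c 0
    omega

theorem pvSum_pos_max (cc : List Int) (right : Int)
    (hmax : ∀ c ∈ cc, c ≤ right) (hs : 0 < cc.sum) : 1 ≤ right := by
  by_contra hcon
  have : cc.sum ≤ 0 := pvSum_nonpos cc (fun c hc => le_trans (hmax c hc) (by omega))
  omega

-- ===== VERDICT =====
theorem solve_chair_stacking_spec : Claim_equal_solve_chair_stacking := by
  intro w cc hdom hpre
  unfold Spec_solve_chair_stacking
  obtain ⟨hne, hcases⟩ := hpre
  obtain ⟨right, hmax⟩ : ∃ m, PySem.List.max? cc (fun x => x) = some m := by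
    cases hm : PySem.List.max? cc (fun x => x) with
    | none => exact absurd ((PySem.List.max?_eq_none_iff cc _).mp hm) hne
    | some m => exact ⟨m, rfl⟩
  have hismax : ∀ c ∈ cc, c ≤ right := fun c hc => PySem.List.max?_isMax hmax c hc
  unfold solve_chair_stacking solve_chair_stacking_alt
  rw [hmax]
  dsimp only
  set h0 : Int :=
    if 0 < w ∧ 0 < cc.sum then min (-(PySem.Int.floordiv (-cc.sum) w)) right else 1 with hh0def
  set h1 : Int := if h0 < right ∧ pvFitsB w right 0 cc = false then right else h0 with hh1def
  have key : pvBisectA w cc 1 right = pvLoopB w cc h1 right := by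
    rcases hcases with hnn | hle | hfl | hsp
    · -- all counts nonnegative: both sides satisfy pvGood, which is unique
      have goodA : pvGood w cc right (pvBisectA w cc 1 right) := by
        by_cases h1r : 1 ≤ right
        · refine pvBisect_good w right cc hnn 1 right le_rfl h1r le_rfl ?_ ?_
          · intro g hg1 hg2
            omega
          · intro hc
            exact absurd hc (lt_irrefl right)
        · rw [pvBisect_skip w cc 1 right (by omega)]
          refine ⟨le_rfl, by omega, ?_, ?_⟩
          · intro g hg1 hg2
            omega
          · intro hc
            exact absurd hc (by omega)
      have h0props : 1 ≤ h0 ∧ h0 ≤ max 1 right ∧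
          (∀ g, 1 ≤ g → g < h0 → ¬ (pvS cc g ≤ w)) := by
        rw [hh0def]
        by_cases hwt : 0 < w ∧ 0 < cc.sum
        · rw [if_pos hwt]
          have hr1 : 1 ≤ right := pvSum_pos_max cc right hismax hwt.2
          rw [pvCeilB_eq cc.sum w hwt.1]
          have hc1 : 1 ≤ pvCeil cc.sum w := pvCeil_pos cc.sum w hwt.1 (by omega)
          refine ⟨by omega, by omega, ?_⟩
          intro g hg1 hg2 hq
          have hgc : g < pvCeil cc.sum w := by omega
          have hmul : cc.sum ≤ g * pvS cc g := pvSum_le_mul_S cc g (by omega)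
          have hgw : g * pvS cc g ≤ g * w := mul_le_mul_of_nonneg_left hq (by omega)
          have : pvCeil cc.sum w ≤ g := (pvCeil_le_iff cc.sum g w hwt.1).mpr (by omega)
          omega
        · rw [if_neg hwt]
          exact ⟨le_rfl, by omega, fun g hg1 hg2 => by omega⟩
      obtain ⟨h01, h0m, h0left⟩ := h0props
      have goodB : pvGood w cc right (pvLoopB w cc h1 right) := by
        rw [hh1def]
        by_cases hcap : h0 < right ∧ pvFitsB w right 0 cc = false
        · rw [if_pos hcap]
          have hrpos : 0 < right := by omega
          have hfalse : ¬ (pvS cc right ≤ w) := by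
            have := pvFitsB_eq w right hrpos cc hne hnn 0
            rw [hcap.2] at this
            intro hq
            have : false = decide (0 + pvS cc right ≤ w) := this
            simp at this
            omega
          refine pvLoop_good w right cc hnn hne right (by omega) (by omega) ?_
          intro g hg1 hg2 hq
          have : pvS cc right ≤ pvS cc g := pvS_antitone cc g right (by omega) (by omega) hnn
          exact hfalse (by omega)
        · rw [if_neg hcap]
          exact pvLoop_good w right cc hnn hne h0 h01 h0m h0left
      exact pvGood_unique w cc right _ _ goodA goodB
    · -- all counts nonpositive: both searches collapse to height 1
      have hr0 : right ≤ 0 := by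
        obtain ⟨m, hm⟩ : ∃ m, m ∈ cc := by
          cases cc with
          | nil => exact absurd rfl hne
          | cons a t => exact ⟨a, by simp⟩
        have := PySem.List.max?_mem hmax
        exact hle right this
      have hsum0 : cc.sum ≤ 0 := pvSum_nonpos cc hle
      have hh0 : h0 = 1 := by
        rw [hh0def]
        rw [if_neg (by omega)]
      have hh1v : h1 = 1 := by
        rw [hh1def, hh0]
        rw [if_neg (by omega)]
      rw [hh1v, pvBisect_skip w cc 1 right (by omega), pvLoop_skip w cc 1 right (by omega)]
    · -- w below the universal lower bound: never feasible, both return max 1 right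
      have hallA : ∀ mh : Int, 0 < mh → pvCanFitA w mh 0 cc = false := fun mh hm =>
        pvCanFitA_false_of_floor w mh cc hm 0 (by omega)
      have hallB : ∀ g : Int, 0 < g → pvFitsB w g 0 cc = false := by
        intro g hg
        cases cc with
        | nil => exact absurd rfl hne
        | cons a t => exact pvFitsB_false_of_floor w g hg t a 0 (by simpa using hfl)
      rw [pvBisect_allfalse w cc hallA 1 right le_rfl]
      have h0b : 1 ≤ h0 ∧ h0 ≤ max 1 right := by
        rw [hh0def]
        by_cases hwt : 0 < w ∧ 0 < cc.sum
        · rw [if_pos hwt]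
          have hr1 : 1 ≤ right := pvSum_pos_max cc right hismax hwt.2
          rw [pvCeilB_eq cc.sum w hwt.1]
          have hc1 : 1 ≤ pvCeil cc.sum w := pvCeil_pos cc.sum w hwt.1 (by omega)
          omega
        · rw [if_neg hwt]
          omega
      by_cases h1r : 1 < right
      · have hh1v : h1 = right ∨ (h1 = h0 ∧ ¬ h0 < right) := by
          rw [hh1def]
          by_cases hcap : h0 < right ∧ pvFitsB w right 0 cc = false
          · rw [if_pos hcap]; exact Or.inl rfl
          · rw [if_neg hcap]
            right
            refine ⟨rfl, ?_⟩
            intro hlt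
            exact hcap ⟨hlt, hallB right (by omega)⟩
        rcases hh1v with hv | ⟨hv, hnl⟩
        · rw [hv, pvLoop_skip w cc right right (lt_irrefl right)]
          omega
        · rw [hv]
          have : h0 = right := by omega
          rw [this, pvLoop_skip w cc right right (lt_irrefl right)]
          omega
      · -- right ≤ 1: the range is trivial on both sides
        have hh0v : h0 = 1 := by
          rw [hh0def]
          by_cases hwt : 0 < w ∧ 0 < cc.sum
          · rw [if_pos hwt]
            have hr1 : 1 ≤ right := pvSum_pos_max cc right hismax hwt.2
            rw [pvCeilB_eq cc.sum w hwt.1]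
            have hc1 : 1 ≤ pvCeil cc.sum w := pvCeil_pos cc.sum w hwt.1 (by omega)
            omega
          · rw [if_neg hwt]
        have hh1v : h1 = 1 := by
          rw [hh1def, hh0v]
          rw [if_neg (by omega)]
        rw [hh1v, pvLoop_skip w cc 1 right (by omega)]
        omega
    · -- w at least the sum of positive counts: always feasible, both return 1
      have hallA : ∀ mh : Int, 0 < mh → pvCanFitA w mh 0 cc = true := fun mh hm =>
        pvCanFitA_true_of_sumPos w mh cc hm 0 (by omega)
      rw [pvBisect_alltrue w cc hallA 1 right le_rfl]
      have hh0v : h0 = 1 := by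
        rw [hh0def]
        by_cases hwt : 0 < w ∧ 0 < cc.sum
        · rw [if_pos hwt]
          have hr1 : 1 ≤ right := pvSum_pos_max cc right hismax hwt.2
          rw [pvCeilB_eq cc.sum w hwt.1]
          have hle1 : pvCeil cc.sum w ≤ 1 := by
            refine (pvCeil_le_iff cc.sum 1 w hwt.1).mpr ?_
            have := pvSum_le_sumPos cc
            omega
          have hge1 : 1 ≤ pvCeil cc.sum w := pvCeil_pos cc.sum w hwt.1 (by omega)
          omega
        · rw [if_neg hwt]
      have hh1v : h1 = 1 := by
        rw [hh1def, hh0v]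
        by_cases h1r : 1 < right
        · rw [if_neg ?_]
          intro hcap
          rw [pvFitsB_true_of_sumPos w right cc (by omega) 0 (by omega)] at hcap
          exact absurd hcap.2 (by simp)
        · rw [if_neg (by omega)]
      rw [hh1v]
      by_cases h1r : 1 < right
      · rw [pvLoopB]
        rw [dif_pos h1r]
        rw [pvFitsB_true_of_sumPos w 1 cc (by norm_num) 0 (by omega)]
        simp
      · rw [pvLoop_skip w cc 1 right (by omega)]
  rw [key]
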